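-- pv_equiv track=rewrite | github.com/dyronald/leetcode_problems | valid_sudoku.py | _is_valid_region
-- ===== SOURCE A (Python) =====
-- def _is_valid_region(board, start_x, start_y, end_x, end_y):
--     found = set()
--     for x in range(start_x, end_x):
--         for y in range(start_y, end_y):
--             val = board[y][x]
--             if val in found and val != ".":
--                 return False
--             else:
--                 found.add(val)
--
--     return True
-- ===== SOURCE B (Python) =====
-- def _is_valid_region(board, start_x, start_y, end_x, end_y):
--     values = sorted(board[y][x]
--                     for x in range(start_x, end_x)
--                     for y in range(start_y, end_y)
--                     if board[y][x] != ".")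
--     return all(a != b for a, b in zip(values, values[1:]))
-- ===== Notes on version B (the rewrite author's own statement) =====
-- stated objective: alternative
-- what changed: B sorts the region's non-'.' values and decides validity by scanning adjacent pairs of the sorted list for an equal pair (sort-then-scan), instead of A's hash-set with early-exit membership tests while looping over the cells.
-- outside the precondition, e.g. on _is_valid_region([['5'], ['5']], 0, 0, 1, 3): A returns False, B raises IndexError
import Mathlib
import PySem

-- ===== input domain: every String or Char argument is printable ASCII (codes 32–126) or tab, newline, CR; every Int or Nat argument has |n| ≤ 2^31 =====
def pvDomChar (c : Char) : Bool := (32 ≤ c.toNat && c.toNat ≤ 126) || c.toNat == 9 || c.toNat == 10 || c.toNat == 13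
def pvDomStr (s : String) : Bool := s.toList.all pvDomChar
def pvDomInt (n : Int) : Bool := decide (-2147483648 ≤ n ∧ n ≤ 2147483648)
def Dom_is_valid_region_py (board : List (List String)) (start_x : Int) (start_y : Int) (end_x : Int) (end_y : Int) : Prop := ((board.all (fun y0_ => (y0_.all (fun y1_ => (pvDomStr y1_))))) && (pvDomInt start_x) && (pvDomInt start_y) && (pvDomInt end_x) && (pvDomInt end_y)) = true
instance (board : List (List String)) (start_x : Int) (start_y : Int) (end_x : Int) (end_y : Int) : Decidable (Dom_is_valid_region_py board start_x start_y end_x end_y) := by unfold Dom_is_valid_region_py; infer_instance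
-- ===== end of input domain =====

-- B sorts the region's non-'.' values and scans adjacent pairs of the sorted list for an equal
-- pair, replacing A's early-exit hash-set membership loop (objective: alternative).

-- board[y][x], total under Pre_ (both indices in Python range, negative wraparound included)
def pvCell (board : List (List String)) (y x : Int) : String :=
  PySem.List.pyGetD (PySem.List.pyGetD board y []) x ""

-- ===== PORT A =====
-- inner 'for y in range(start_y, end_y)' loop; none = the early 'return False'
def pvAInner (board : List (List String)) (x : Int) (ys : List Int)
    (found : PySem.Set String) : Option (PySem.Set String) :=
  match ys with
  | [] => some found
  | y :: rest =>
    let val := pvCell board y x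
    if PySem.Set.contains found val && !(val == ".") then none
    else pvAInner board x rest (PySem.Set.add found val)

-- outer 'for x in range(start_x, end_x)' loop
def pvAOuter (board : List (List String)) (start_y end_y : Int) (xs : List Int)
    (found : PySem.Set String) : Bool :=
  match xs with
  | [] => true
  | x :: rest =>
    match pvAInner board x (PySem.List.pyRange start_y end_y 1) found with
    | none => false
    | some f => pvAOuter board start_y end_y rest f

def is_valid_region_py (board : List (List String)) (start_x : Int) (start_y : Int) (end_x : Int) (end_y : Int) : Bool :=
  pvAOuter board start_y end_y (PySem.List.pyRange start_x end_x 1) PySem.Set.empty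

-- ===== PORT B =====
-- values[1:] is ported as .drop 1 (exact: the slice start 1 is nonnegative)
def is_valid_region_py_alt (board : List (List String)) (start_x : Int) (start_y : Int) (end_x : Int) (end_y : Int) : Bool :=
  let values :=
    PySem.List.sorted
      ((PySem.List.pyRange start_x end_x 1).flatMap (fun x =>
        ((PySem.List.pyRange start_y end_y 1).map (fun y => pvCell board y x)).filter
          (fun v => !(v == "."))))
      (fun v => v) false
  (values.zip (values.drop 1)).all (fun p => !(p.1 == p.2))

-- ===== PRECONDITION & SPEC =====
-- Pre_ excludes the inputs where some region cell index is out of Python range: there the Python A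
-- either raises IndexError or (when a duplicate is met first) returns False early, while B, which
-- reads every region cell, raises IndexError.
def Pre_is_valid_region_py (board : List (List String)) (start_x : Int) (start_y : Int) (end_x : Int) (end_y : Int) : Prop :=
  (start_x < end_x ∧ start_y < end_y) →
    (-(board.length : Int) ≤ start_y ∧ end_y ≤ (board.length : Int) ∧
     ∀ y ∈ PySem.List.pyRange start_y end_y 1,
       -(((PySem.List.pyGetD board y []).length : Int)) ≤ start_x ∧
       end_x ≤ ((PySem.List.pyGetD board y []).length : Int))
instance (board : List (List String)) (start_x : Int) (start_y : Int) (end_x : Int) (end_y : Int) : Decidable (Pre_is_valid_region_py board start_x start_y end_x end_y) := by unfold Pre_is_valid_region_py; infer_instance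

def pvWitness_is_valid_region_py : List (List String) × Int × Int × Int × Int :=
  ([["5", ".", ""], [".", "5", "x"]], 0, 0, 2, 2)

def Spec_is_valid_region_py (board : List (List String)) (start_x : Int) (start_y : Int) (end_x : Int) (end_y : Int) (out : Bool) : Prop := out = is_valid_region_py_alt board start_x start_y end_x end_y
instance (board : List (List String)) (start_x : Int) (start_y : Int) (end_x : Int) (end_y : Int) (out : Bool) : Decidable (Spec_is_valid_region_py board start_x start_y end_x end_y out) := by unfold Spec_is_valid_region_py; infer_instance

-- ===== CLAIM (what is proved, stated in full; the proofs are below) =====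
def Claim_equal_is_valid_region_py : Prop := ∀ (board : List (List String)) (start_x : Int) (start_y : Int) (end_x : Int) (end_y : Int), Dom_is_valid_region_py board start_x start_y end_x end_y → Pre_is_valid_region_py board start_x start_y end_x end_y → Spec_is_valid_region_py board start_x start_y end_x end_y (is_valid_region_py board start_x start_y end_x end_y)

-- ===== LEMMAS AND PROOFS =====

-- A's loop body over an explicit list of cell values
def pvScan (vs : List String) (found : PySem.Set String) : Option (PySem.Set String) :=
  match vs with
  | [] => some found
  | v :: rest =>
    if PySem.Set.contains found v && !(v == ".") then none
    else pvScan rest (PySem.Set.add found v)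

theorem pvAInner_eq_scan (board : List (List String)) (x : Int) (ys : List Int)
    (found : PySem.Set String) :
    pvAInner board x ys found = pvScan (ys.map (fun y => pvCell board y x)) found := by
  induction ys generalizing found with
  | nil => rfl
  | cons y rest ih => simp [pvAInner, pvScan, ih]

theorem pvScan_append (as bs : List String) (found : PySem.Set String) :
    pvScan (as ++ bs) found = (pvScan as found).bind (pvScan bs) := by
  induction as generalizing found with
  | nil => rfl
  | cons a rest ih =>
    simp only [List.cons_append, pvScan]
    split
    · rfl
    · exact ih _

theorem pvAOuter_eq_scan (board : List (List String)) (sy ey : Int) (xs : List Int)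
    (found : PySem.Set String) :
    pvAOuter board sy ey xs found =
      (pvScan (xs.flatMap (fun x => (PySem.List.pyRange sy ey 1).map (fun y => pvCell board y x))) found).isSome := by
  induction xs generalizing found with
  | nil => rfl
  | cons x rest ih =>
    simp only [pvAOuter, List.flatMap_cons, pvScan_append, pvAInner_eq_scan]
    cases pvScan ((PySem.List.pyRange sy ey 1).map (fun y => pvCell board y x)) found with
    | none => rfl
    | some f => exact ih f

theorem pvScan_isSome_iff (vs : List String) (found : PySem.Set String) :
    (pvScan vs found).isSome = true ↔
      ((vs.filter (fun v => !(v == "."))).Nodup ∧ ∀ v ∈ vs, v ≠ "." → v ∉ found) := by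
  induction vs generalizing found with
  | nil => simp [pvScan]
  | cons v rest ih =>
    by_cases hv : v = "."
    · subst hv
      simp only [pvScan, PySem.Set.contains_eq_listContains]
      simp only [List.filter_cons]
      norm_num
      rw [ih]
      constructor
      · rintro ⟨h1, h2⟩
        refine ⟨h1, fun w hw hwd => ?_⟩
        have := h2 w hw hwd
        rw [PySem.Set.mem_add] at this
        tauto
      · rintro ⟨h1, h2⟩
        refine ⟨h1, fun w hw hwd => ?_⟩
        rw [PySem.Set.mem_add]
        rintro (h | h)
        · exact h2 w hw hwd h
        · exact hwd h
    · have hfc : List.filter (fun w => !(w == ".")) (v :: rest)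
          = v :: List.filter (fun w => !(w == ".")) rest :=
        List.filter_cons_of_pos (by simp [hv])
      by_cases hmem : v ∈ found
      · have hcond : (PySem.Set.contains found v && !(v == ".")) = true := by
          simp [PySem.Set.contains_eq_listContains, hmem, hv]
        rw [show pvScan (v :: rest) found = none from by simp only [pvScan, hcond, if_true]]
        simp only [Option.isSome_none]
        constructor
        · intro h; cases h
        · rintro ⟨-, h2⟩; exact absurd hmem (h2 v (by simp) hv)
      · have hcond : (PySem.Set.contains found v && !(v == ".")) = false := by
          simp [PySem.Set.contains_eq_listContains, hmem]
        rw [show pvScan (v :: rest) found = pvScan rest (PySem.Set.add found v) from by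
          simp only [pvScan, hcond, Bool.false_eq_true, if_false]]
        rw [ih, hfc]
        constructor
        · rintro ⟨h1, h2⟩
          have hvrest : v ∉ rest.filter (fun w => !(w == ".")) := by
            intro hmemf
            have hvr : v ∈ rest := List.mem_of_mem_filter hmemf
            exact (h2 v hvr hv) (by rw [PySem.Set.mem_add]; right; rfl)
          refine ⟨List.Nodup.cons hvrest h1, fun w hw hwd => ?_⟩
          rcases List.mem_cons.mp hw with rfl | hw'
          · exact hmem
          · intro hwf
            exact (h2 w hw' hwd) (by rw [PySem.Set.mem_add]; left; exact hwf)
        · rintro ⟨h1, h2⟩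
          rcases List.nodup_cons.mp h1 with ⟨hvf, h1'⟩
          refine ⟨h1', fun w hw hwd => ?_⟩
          rw [PySem.Set.mem_add]
          rintro (h | h)
          · exact h2 w (by right; exact hw) hwd h
          · subst h
            exact hvf (List.mem_filter.mpr ⟨hw, by simpa using hwd⟩)

-- a weakly increasing list with no equal adjacent pair has no duplicates, and conversely
theorem pvAdjAll_iff_nodup (S : List String) (hs : S.Pairwise (· ≤ ·)) :
    ((S.zip (S.drop 1)).all (fun p => !(p.1 == p.2)) = true) ↔ S.Nodup := by
  induction S with
  | nil => simp
  | cons a t ih =>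
    cases t with
    | nil => simp
    | cons b u =>
      rcases List.pairwise_cons.mp hs with ⟨ha, hs'⟩
      simp only [List.drop_succ_cons, List.drop_zero, List.zip_cons_cons, List.all_cons,
        Bool.and_eq_true, ne_eq, Bool.not_eq_eq_eq_not, Bool.not_true, beq_eq_false_iff_ne]
      have ih' := ih hs'
      simp only [List.drop_succ_cons, List.drop_zero] at ih'
      rw [ih']
      constructor
      · rintro ⟨hab, hnd⟩
        refine List.nodup_cons.mpr ⟨?_, hnd⟩
        intro hmem
        rcases List.mem_cons.mp hmem with rfl | hmem'
        · exact hab rfl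
        · -- a ≤ b, b ≤ every element of u, a ∈ u, a ≠ b ⇒ contradiction
          have hab' : a ≤ b := ha b (by simp)
          have hba : b ≤ a := (List.pairwise_cons.mp hs').1 a hmem'
          exact hab (le_antisymm hab' hba)
      · intro hnd
        rcases List.nodup_cons.mp hnd with ⟨hna, hnd'⟩
        exact ⟨fun h => hna (h ▸ List.mem_cons_self), hnd'⟩

theorem filter_flatMap_eq (xs : List Int) (f : Int → List String) (p : String → Bool) :
    (xs.flatMap f).filter p = xs.flatMap (fun x => (f x).filter p) := by
  induction xs with
  | nil => rfl
  | cons x rest ih => simp [List.flatMap_cons, List.filter_append, ih]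

-- ===== VERDICT (by name: the statement is the Claim_ definition above) =====
theorem is_valid_region_py_spec : Claim_equal_is_valid_region_py := by
  intro board sx sy ex ey _ _
  unfold Spec_is_valid_region_py is_valid_region_py
  simp only [is_valid_region_py_alt]
  rw [pvAOuter_eq_scan]
  set L := (PySem.List.pyRange sx ex 1).flatMap
      (fun x => (PySem.List.pyRange sy ey 1).map (fun y => pvCell board y x)) with hL
  rw [show (PySem.List.pyRange sx ex 1).flatMap (fun x =>
      ((PySem.List.pyRange sy ey 1).map (fun y => pvCell board y x)).filter (fun v => !(v == "."))) =
      L.filter (fun v => !(v == ".")) from by rw [hL, filter_flatMap_eq]]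
  set F := L.filter (fun v => !(v == ".")) with hF
  set S := PySem.List.sorted F (fun v => v) false with hS
  have hA : (pvScan L PySem.Set.empty).isSome = true ↔ F.Nodup := by
    rw [pvScan_isSome_iff]
    simp [PySem.Set.empty, ← hF]
  have hperm : S.Perm F := PySem.List.sorted_perm F (fun v => v) false
  have hB : ((S.zip (S.drop 1)).all (fun p => !(p.1 == p.2)) = true) ↔ F.Nodup := by
    rw [pvAdjAll_iff_nodup S (PySem.List.sorted_pairwise F (fun v => v))]
    exact hperm.nodup_iff
  exact Bool.coe_iff_coe.mp (hA.trans hB.symm)
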